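-- pv_equiv track=rewrite | github.com/Anubis-1001/competitive-programming | almostArithmeticProgression.py | almostProgression
-- ===== SOURCE A (Python) =====
-- def almostProgression(N, nums):
--     if N==1:
--         return 0
--     f_sum=sum(nums)
--     r_coef=N*(N-1)//2
--     i=nums[0]
--     result=float("inf")
--     for n in range(-N, N+1):
--         l_sum=f_sum+n
--         for initial in [i-1, i, i+1]:
--             D=l_sum-initial*N
--             if D%r_coef==0:
--                 res=validate((initial, l_sum, D//r_coef), nums)
--                 if res != -1:
--                     result=min(res, result)
--     return result if result != float("inf") else -1
--
-- def validate(formula, nums):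
--     i, s, r = formula
--     count=0
--     for p, n in enumerate(nums):
--         if abs(i+p*r - n) > 1:
--             return -1
--         else:
--             count+=abs(i+p*r - n)
--
--     return count
-- ===== SOURCE B (Python) =====
-- def almostProgression(N, nums):
--     # For each of the 3 choices of first term, the feasible common differences
--     # form a closed interval computed in O(1); each candidate is validated in O(N).
--     if N == 1:
--         return 0
--     first = nums[0]
--     total = sum(nums)
--     r_coef = N * (N - 1) // 2
--     best = -1
--     for initial in (first - 1, first, first + 1):
--         D0 = total - initial * N
--         lo = -((-(D0 - N)) // r_coef)   # ceil((D0 - N) / r_coef)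
--         hi = (D0 + N) // r_coef         # floor((D0 + N) / r_coef)
--         for r in range(lo, hi + 1):
--             cost = 0
--             for p, n in enumerate(nums):
--                 d = abs(initial + p * r - n)
--                 if d > 1:
--                     cost = None
--                     break
--                 cost += d
--             if cost is not None and (best == -1 or cost < best):
--                 best = cost
--     return best
-- ===== Notes on version B (the rewrite author's own statement) =====
-- stated objective: faster
-- what changed: Instead of scanning all 2N+1 total-sum adjustments and testing divisibility for each, B computes for each of the 3 first-term choices the exact closed interval [ceil((D0-N)/r_coef), floor((D0+N)/r_coef)] of feasible common differences and validates only those candidates.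
-- outside the precondition, e.g. on almostProgression(0, [1, 2]): A raises ZeroDivisionError, B raises ZeroDivisionError; on almostProgression(2, []): A raises IndexError, B raises IndexError
import Mathlib
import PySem

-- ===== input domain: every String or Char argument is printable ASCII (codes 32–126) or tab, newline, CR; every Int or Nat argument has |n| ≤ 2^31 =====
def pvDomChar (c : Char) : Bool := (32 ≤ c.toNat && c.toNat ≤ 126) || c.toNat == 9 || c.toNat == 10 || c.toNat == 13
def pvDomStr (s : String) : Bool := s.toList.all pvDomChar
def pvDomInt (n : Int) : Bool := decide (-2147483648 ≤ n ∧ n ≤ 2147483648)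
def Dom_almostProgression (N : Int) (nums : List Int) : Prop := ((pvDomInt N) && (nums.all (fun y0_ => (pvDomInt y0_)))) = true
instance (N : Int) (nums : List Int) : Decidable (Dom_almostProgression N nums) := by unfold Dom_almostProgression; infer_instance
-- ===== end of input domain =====

-- B replaces A's scan over all 2N+1 total-sum adjustments by the closed interval of
-- feasible common differences per first-term choice (objective: faster, constant factor).

-- ===== PORT A =====
-- validate((i, s, r), nums); the 's' component is never used by validate, so it is not a parameter here
def validateA (i r : Int) : List Int → Int → Int → Int
  | [], _, count => count
  | n :: rest, p, count =>
      if |i + p * r - n| > 1 then -1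
      else validateA i r rest (p + 1) (count + |i + p * r - n|)

def almostProgression (N : Int) (nums : List Int) : Int :=
  if N = 1 then 0 else
  let f_sum := nums.sum
  let r_coef := PySem.Int.floordiv (N * (N - 1)) 2
  match PySem.List.pyGet? nums 0 with
  | none => 0  -- unreachable under Pre_: nums[0] raises IndexError in Python
  | some i =>
    let res :=
      (PySem.List.pyRange (-N) (N + 1) 1).foldl (fun result n =>
        let l_sum := f_sum + n
        [i - 1, i, i + 1].foldl (fun result initial =>
          let D := l_sum - initial * N
          if PySem.Int.mod D r_coef = 0 then
            let res := validateA initial (PySem.Int.floordiv D r_coef) nums 0 0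
            if res ≠ -1 then
              some (match result with | none => res | some m => min res m)  -- result = min(res, result), float('inf') = none
            else result
          else result) result) (none : Option Int)
    match res with
    | none => -1   -- result == float('inf')
    | some m => m

-- ===== PORT B =====
def costB (initial r : Int) : List Int → Int → Int → Option Int
  | [], _, cost => some cost
  | n :: rest, p, cost =>
      let d := |initial + p * r - n|
      if d > 1 then none   -- cost = None; break
      else costB initial r rest (p + 1) (cost + d)

def almostProgression_alt (N : Int) (nums : List Int) : Int :=
  if N = 1 then 0 else
  match PySem.List.pyGet? nums 0 with
  | none => 0  -- unreachable under Pre_: nums[0] raises IndexError in Python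
  | some first =>
    let total := nums.sum
    let r_coef := PySem.Int.floordiv (N * (N - 1)) 2
    [first - 1, first, first + 1].foldl (fun best initial =>
      let D0 := total - initial * N
      let lo := -(PySem.Int.floordiv (-(D0 - N)) r_coef)
      let hi := PySem.Int.floordiv (D0 + N) r_coef
      (PySem.List.pyRange lo (hi + 1) 1).foldl (fun best r =>
        match costB initial r nums 0 0 with
        | none => best
        | some cost => if best = -1 ∨ cost < best then cost else best) best) (-1 : Int)

-- ===== PRECONDITION & SPEC =====
-- Pre_ excludes exactly the inputs where Python A raises: empty nums with N ≠ 1 (IndexError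
-- at nums[0]) and N = 0 with nonempty nums (ZeroDivisionError at D % r_coef); B raises there too.
def Pre_almostProgression (N : Int) (nums : List Int) : Prop := N = 1 ∨ (nums ≠ [] ∧ N ≠ 0)
instance (N : Int) (nums : List Int) : Decidable (Pre_almostProgression N nums) := by unfold Pre_almostProgression; infer_instance
def pvWitness_almostProgression : Int × List Int := (3, [0, 1, 2])

def Spec_almostProgression (N : Int) (nums : List Int) (out : Int) : Prop := out = almostProgression_alt N nums
instance (N : Int) (nums : List Int) (out : Int) : Decidable (Spec_almostProgression N nums out) := by unfold Spec_almostProgression; infer_instance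

-- ===== CLAIM (what is proved, stated in full; the proofs are below) =====
def Claim_equal_almostProgression : Prop := ∀ (N : Int) (nums : List Int), Dom_almostProgression N nums → Pre_almostProgression N nums → Spec_almostProgression N nums (almostProgression N nums)

-- ===== LEMMAS AND PROOFS =====

-- Minimum accumulator: 'none' plays the role of float('inf'), sentinel -1 its Int image.
def ominA : Option Int → Int → Option Int :=
  fun acc x => some (match acc with | none => x | some m => min x m)
def toSent : Option Int → Int := fun o => o.getD (-1)
def ostep {α : Type} (f : α → Option Int) : Option Int → α → Option Int :=
  fun acc a => match f a with | none => acc | some x => ominA acc x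
def sstep {α : Type} (f : α → Option Int) : Int → α → Int :=
  fun best a => match f a with | none => best | some c => if best = -1 ∨ c < best then c else best
def vOf (nums : List Int) (init r : Int) : Option Int := costB init r nums 0 0
def gA (nums : List Int) (f_sum rc N n init : Int) : Option Int :=
  if PySem.Int.mod (f_sum + n - init * N) rc = 0 then
    vOf nums init (PySem.Int.floordiv (f_sum + n - init * N) rc)
  else none

theorem matchSent (o : Option Int) :
    (match o with | none => (-1 : Int) | some m => m) = toSent o := by
  cases o <;> rfl

theorem validateA_eq_costB (i r : Int) (nums : List Int) : ∀ (p c : Int),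
    validateA i r nums p c = (match costB i r nums p c with | none => -1 | some x => x) := by
  induction nums with
  | nil => intro p c; simp [validateA, costB]
  | cons n rest ih =>
      intro p c
      by_cases h : |i + p * r - n| > 1 <;> simp [validateA, costB, h, ih]

theorem costB_nonneg (i r : Int) (nums : List Int) : ∀ (p c x : Int),
    0 ≤ c → costB i r nums p c = some x → 0 ≤ x := by
  induction nums with
  | nil => intro p c x hc h; simp [costB] at h; omega
  | cons n rest ih =>
      intro p c x hc h
      by_cases hd : |i + p * r - n| > 1
      · simp [costB, hd] at h
      · simp only [costB, if_neg hd] at h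
        exact ih (p + 1) (c + |i + p * r - n|) x (by positivity) h

theorem foldl_ostep {α : Type} (f : α → Option Int) (l : List α) : ∀ (acc : Option Int),
    l.foldl (ostep f) acc = (l.filterMap f).foldl ominA acc := by
  induction l with
  | nil => intro acc; rfl
  | cons a l ih => intro acc; cases h : f a <;> simp [ostep, h, ih]

theorem foldl_sent {α : Type} (f : α → Option Int) (hf : ∀ a x, f a = some x → 0 ≤ x)
    (l : List α) : ∀ (acc : Option Int), (∀ m, acc = some m → 0 ≤ m) →
    l.foldl (sstep f) (toSent acc) = toSent (l.foldl (ostep f) acc) := by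
  induction l with
  | nil => intro acc _; rfl
  | cons a l ih =>
      intro acc hacc
      cases h : f a with
      | none =>
          simp only [List.foldl_cons, sstep, ostep, h]
          exact ih acc hacc
      | some c =>
          have hc : 0 ≤ c := hf a c h
          have hstep : sstep f (toSent acc) a = toSent (ostep f acc a) := by
            cases acc with
            | none => simp [sstep, ostep, ominA, toSent, h]
            | some m =>
                have hm : 0 ≤ m := hacc m rfl
                simp only [sstep, ostep, ominA, toSent, h, Option.getD_some]
                by_cases hlt : c < m
                · rw [if_pos (Or.inr hlt)]; omega
                · rw [if_neg (by omega)]; omega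
          rw [List.foldl_cons, List.foldl_cons, hstep]
          apply ih
          intro m' hm'
          cases acc with
          | none => simp [ostep, ominA, h] at hm'; omega
          | some m =>
              have hm : 0 ≤ m := hacc m rfl
              simp [ostep, ominA, h] at hm'
              omega

theorem foldl_ominA_some (l : List Int) : ∀ (a : Int),
    l.foldl ominA (some a) = some (l.foldl min a) := by
  induction l with
  | nil => intro a; rfl
  | cons b l ih =>
      intro a
      simp only [List.foldl_cons, ominA]
      rw [ih, min_comm b a]

theorem foldl_ominA_none (l : List Int) : l.foldl ominA none = l.min? := by
  cases l with
  | nil => rfl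
  | cons a l =>
      show List.foldl ominA (some a) l = _
      rw [foldl_ominA_some]
      rfl

theorem min?_ext (l₁ l₂ : List Int) (h : ∀ x, x ∈ l₁ ↔ x ∈ l₂) : l₁.min? = l₂.min? := by
  cases h₁ : l₁.min? with
  | none =>
      rw [List.min?_eq_none_iff] at h₁
      subst h₁
      symm
      rw [List.min?_eq_none_iff]
      cases l₂ with
      | nil => rfl
      | cons a l => exact absurd ((h a).2 List.mem_cons_self) (by simp)
  | some m =>
      obtain ⟨hm, hub⟩ := List.min?_eq_some_iff.1 h₁
      symm
      rw [List.min?_eq_some_iff]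
      exact ⟨(h m).1 hm, fun b hb => hub b ((h b).2 hb)⟩

theorem foldl_ominA_ext (l₁ l₂ : List Int) (h : ∀ x, x ∈ l₁ ↔ x ∈ l₂) :
    l₁.foldl ominA none = l₂.foldl ominA none := by
  rw [foldl_ominA_none, foldl_ominA_none]
  exact min?_ext l₁ l₂ h

theorem rc_pos (N : Int) (h0 : N ≠ 0) (h1 : N ≠ 1) :
    0 < PySem.Int.floordiv (N * (N - 1)) 2 := by
  have hcase : N ≤ -1 ∨ 2 ≤ N := by omega
  have h2 : (2 : Int) ≤ N * (N - 1) := by rcases hcase with h | h <;> nlinarith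
  have := (PySem.Int.le_floordiv_iff_mul_le (a := N * (N - 1)) (q := 1)
    (by norm_num : (0:Int) < 2)).2 (by linarith)
  omega

-- The heart of the equivalence: A's scan over sum adjustments n ∈ [-N, N] with a
-- divisibility test hits exactly the closed interval of ratios that B enumerates.
theorem core (rc N f_sum I : Int) (hrc : 0 < rc) (P : Int → Prop) :
    (∃ n, (-N ≤ n ∧ n < N + 1) ∧ PySem.Int.mod (f_sum + n - I * N) rc = 0 ∧
        P (PySem.Int.floordiv (f_sum + n - I * N) rc)) ↔
    (∃ r, (-(PySem.Int.floordiv (-(f_sum - I * N - N)) rc) ≤ r ∧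
        r < PySem.Int.floordiv (f_sum - I * N + N) rc + 1) ∧ P r) := by
  constructor
  · rintro ⟨n, ⟨hn1, hn2⟩, hmod, hP⟩
    obtain ⟨r, hr⟩ := (PySem.Int.mod_eq_zero_iff_dvd _ _).1 hmod
    have hfd : PySem.Int.floordiv (f_sum + n - I * N) rc = r := by
      rw [PySem.Int.floordiv_eq_iff_of_pos hrc]
      constructor <;> nlinarith
    refine ⟨r, ⟨?_, ?_⟩, by rwa [hfd] at hP⟩
    · have hle : (-r) * rc ≤ -(f_sum - I * N - N) := by nlinarith
      have := (PySem.Int.le_floordiv_iff_mul_le (a := -(f_sum - I * N - N)) (q := -r) hrc).2 hle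
      omega
    · have := (PySem.Int.le_floordiv_iff_mul_le (a := f_sum - I * N + N) (q := r) hrc).2
        (by nlinarith)
      omega
  · rintro ⟨r, ⟨hr1, hr2⟩, hP⟩
    have h1 : r * rc ≤ f_sum - I * N + N :=
      (PySem.Int.le_floordiv_iff_mul_le hrc).1 (by omega)
    have h2 : (-r) * rc ≤ -(f_sum - I * N - N) :=
      (PySem.Int.le_floordiv_iff_mul_le hrc).1 (by omega)
    refine ⟨r * rc - (f_sum - I * N), ⟨by nlinarith, by nlinarith⟩, ?_, ?_⟩
    · have hx : f_sum + (r * rc - (f_sum - I * N)) - I * N = r * rc := by ring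
      rw [hx, PySem.Int.mod_eq_zero_iff_dvd]
      exact dvd_mul_left rc r
    · have hx : f_sum + (r * rc - (f_sum - I * N)) - I * N = r * rc := by ring
      rw [hx]
      have hfd : PySem.Int.floordiv (r * rc) rc = r := by
        rw [PySem.Int.floordiv_eq_iff_of_pos hrc]
        constructor <;> nlinarith
      rwa [hfd]

theorem gA_eq_some (nums : List Int) (f_sum rc N n init x : Int) :
    gA nums f_sum rc N n init = some x ↔
    (PySem.Int.mod (f_sum + n - init * N) rc = 0 ∧
      vOf nums init (PySem.Int.floordiv (f_sum + n - init * N) rc) = some x) := by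
  unfold gA
  split <;> simp_all

theorem pyGet?_cons_zero (a : Int) (l : List Int) :
    PySem.List.pyGet? (a :: l) 0 = some a := by
  simp [PySem.List.pyGet?, PySem.List.pyIdx?]

theorem bodyA_eq (nums : List Int) (f_sum rc N n : Int) (result : Option Int) (initial : Int) :
    (if PySem.Int.mod (f_sum + n - initial * N) rc = 0 then
        if validateA initial (PySem.Int.floordiv (f_sum + n - initial * N) rc) nums 0 0 ≠ -1 then
          some (match result with
            | none => validateA initial (PySem.Int.floordiv (f_sum + n - initial * N) rc) nums 0 0
            | some m => min (validateA initial (PySem.Int.floordiv (f_sum + n - initial * N) rc) nums 0 0) m)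
        else result
      else result)
    = ostep (gA nums f_sum rc N n) result initial := by
  by_cases hmod : PySem.Int.mod (f_sum + n - initial * N) rc = 0
  · rw [if_pos hmod]
    cases hv : costB initial (PySem.Int.floordiv (f_sum + n - initial * N) rc) nums 0 0 with
    | none =>
        have hval := validateA_eq_costB initial (PySem.Int.floordiv (f_sum + n - initial * N) rc) nums 0 0
        rw [hv] at hval
        simp [hval, ostep, gA, hmod, vOf, hv]
    | some x =>
        have hval := validateA_eq_costB initial (PySem.Int.floordiv (f_sum + n - initial * N) rc) nums 0 0
        rw [hv] at hval
        have hx : 0 ≤ x := costB_nonneg _ _ nums 0 0 x le_rfl hv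
        have hne : x ≠ -1 := by omega
        simp only [hval, ostep, gA, if_pos hmod, vOf, hv, if_pos hne, ne_eq]
        rfl
  · simp [hmod, ostep, gA]

theorem A_char (N first : Int) (rest : List Int) (hN : ¬ N = 1) :
    almostProgression N (first :: rest) =
    toSent (((PySem.List.pyRange (-N) (N + 1) 1).flatMap (fun n =>
        [first - 1, first, first + 1].filterMap
          (gA (first :: rest) (first :: rest).sum (PySem.Int.floordiv (N * (N - 1)) 2) N n))).foldl
      ominA none) := by
  simp only [almostProgression, if_neg hN, pyGet?_cons_zero]
  rw [List.foldl_flatMap, ← matchSent]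
  congr 1
  apply List.foldl_ext
  intro acc n _
  rw [← foldl_ostep]
  apply List.foldl_ext
  intro result initial _
  exact bodyA_eq (first :: rest) (first :: rest).sum (PySem.Int.floordiv (N * (N - 1)) 2) N n result initial

theorem B_char (N first : Int) (rest : List Int) (hN : ¬ N = 1) :
    almostProgression_alt N (first :: rest) =
    toSent ((([first - 1, first, first + 1].flatMap (fun init =>
        (PySem.List.pyRange
            (-(PySem.Int.floordiv (-((first :: rest).sum - init * N - N)) (PySem.Int.floordiv (N * (N - 1)) 2)))
            (PySem.Int.floordiv ((first :: rest).sum - init * N + N) (PySem.Int.floordiv (N * (N - 1)) 2) + 1)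
            1).map (fun r => (init, r)))).filterMap
        (fun p => vOf (first :: rest) p.1 p.2)).foldl ominA none) := by
  rw [← foldl_ostep,
    ← foldl_sent (fun p : Int × Int => vOf (first :: rest) p.1 p.2)
      (fun p x h => costB_nonneg p.1 p.2 (first :: rest) 0 0 x le_rfl h)
      _ none (fun m h => nomatch h),
    List.foldl_flatMap]
  simp only [almostProgression_alt, if_neg hN, pyGet?_cons_zero]
  apply List.foldl_ext
  intro best init _
  rw [List.foldl_map]
  apply List.foldl_ext
  intro b r _
  rfl

theorem mem_eq (N first : Int) (rest : List Int) (hrc : 0 < PySem.Int.floordiv (N * (N - 1)) 2)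
    (x : Int) :
    (x ∈ (PySem.List.pyRange (-N) (N + 1) 1).flatMap (fun n =>
        [first - 1, first, first + 1].filterMap
          (gA (first :: rest) (first :: rest).sum (PySem.Int.floordiv (N * (N - 1)) 2) N n))) ↔
    (x ∈ ([first - 1, first, first + 1].flatMap (fun init =>
        (PySem.List.pyRange
            (-(PySem.Int.floordiv (-((first :: rest).sum - init * N - N)) (PySem.Int.floordiv (N * (N - 1)) 2)))
            (PySem.Int.floordiv ((first :: rest).sum - init * N + N) (PySem.Int.floordiv (N * (N - 1)) 2) + 1)
            1).map (fun r => (init, r)))).filterMap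
        (fun p => vOf (first :: rest) p.1 p.2)) := by
  simp only [List.mem_flatMap, List.mem_filterMap, List.mem_map, PySem.List.mem_pyRange_one]
  constructor
  · rintro ⟨n, hn, init, hinit, hg⟩
    obtain ⟨hmod, hv⟩ := (gA_eq_some _ _ _ _ _ _ _).1 hg
    obtain ⟨r, hr, hvr⟩ :=
      (core (PySem.Int.floordiv (N * (N - 1)) 2) N (first :: rest).sum init hrc
        (fun r => vOf (first :: rest) init r = some x)).1 ⟨n, hn, hmod, hv⟩
    exact ⟨(init, r), ⟨init, hinit, r, hr, rfl⟩, hvr⟩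
  · rintro ⟨a, ⟨init, hinit, r, hr, rfl⟩, hv⟩
    obtain ⟨n, hn, hmod, hvn⟩ :=
      (core (PySem.Int.floordiv (N * (N - 1)) 2) N (first :: rest).sum init hrc
        (fun r => vOf (first :: rest) init r = some x)).2 ⟨r, hr, hv⟩
    exact ⟨n, hn, init, hinit, (gA_eq_some _ _ _ _ _ _ _).2 ⟨hmod, hvn⟩⟩

-- ===== VERDICT (by name: the statement is the Claim_ definition above) =====
theorem almostProgression_spec : Claim_equal_almostProgression := by
  intro N nums _ hpre
  unfold Spec_almostProgression
  by_cases hN : N = 1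
  · subst hN; simp [almostProgression, almostProgression_alt]
  · have hpre' : nums ≠ [] ∧ N ≠ 0 := by
      rcases hpre with h | h
      · exact absurd h hN
      · exact h
    obtain ⟨hne, hN0⟩ := hpre'
    obtain ⟨first, rest, rfl⟩ : ∃ f r, nums = f :: r := by
      cases nums with
      | nil => exact absurd rfl hne
      | cons a l => exact ⟨a, l, rfl⟩
    rw [A_char N first rest hN, B_char N first rest hN]
    congr 1
    exact foldl_ominA_ext _ _ (mem_eq N first rest (rc_pos N hN0 hN))
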